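-- pv_equiv track=rewrite | github.com/EdmundMartin/LeetcodeAllSolutions | leetcode_easy/1196_how_many_apples_can_you_put_into_basket.py | maxNumberOfApples
-- ===== SOURCE A (Python) =====
-- from typing import List
--
-- def maxNumberOfApples(weight: List[int]) -> int:
--     if sum(weight) < 5_000:
--         return len(weight)
--     weight.sort()
--     remaining = 5_000
--     count = 0
--     while weight and weight[0] <= remaining:
--         count += 1
--         remaining -= weight[0]
--         weight = weight[1:]
--     return count
-- ===== SOURCE B (Python) =====
-- from typing import List
--
-- def maxNumberOfApples(weight: List[int]) -> int:
--     if sum(weight) < 5_000: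
--         return len(weight)
--     prefixes = []
--     running = 0
--     for w in sorted(weight):
--         running += w
--         prefixes.append(running)
--     return sum(1 for p in prefixes if p <= 5_000)
-- ===== Notes on version B (the rewrite author's own statement) =====
-- stated objective: alternative
-- what changed: Replaces A's while-loop that repeatedly re-slices the list (weight = weight[1:]) and counts down a remaining budget with a prefix-sum pass over the sorted list followed by counting the prefixes that stay within 5000 (correct because once a sorted prefix exceeds the budget every later element is positive, so all later prefixes exceed it too); B does not mutate its argument.
import Mathlib
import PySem

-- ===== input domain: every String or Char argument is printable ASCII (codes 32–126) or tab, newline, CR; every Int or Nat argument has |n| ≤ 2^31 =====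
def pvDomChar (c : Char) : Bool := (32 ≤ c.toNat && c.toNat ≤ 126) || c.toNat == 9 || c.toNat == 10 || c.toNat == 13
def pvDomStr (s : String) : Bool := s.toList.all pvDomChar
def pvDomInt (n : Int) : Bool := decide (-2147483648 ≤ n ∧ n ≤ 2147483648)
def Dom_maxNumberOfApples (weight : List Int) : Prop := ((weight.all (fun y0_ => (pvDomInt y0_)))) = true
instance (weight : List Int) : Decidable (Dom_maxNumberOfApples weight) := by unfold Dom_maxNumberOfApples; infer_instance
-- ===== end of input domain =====

-- B replaces A's while-loop (repeated weight[1:] re-slicing with a countdown budget) by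
-- building the prefix sums of the sorted list and counting those that stay within 5000;
-- equivalence is about the RETURN value only (A sorts its argument in place when
-- sum(weight) >= 5000, B does not mutate).

-- ===== PORT A =====
-- while weight and weight[0] <= remaining: count += 1; remaining -= weight[0]; weight = weight[1:]
-- (on a cons cell w :: rest, weight[1:] is exactly rest)
def maxApplesWhileA : List Int → Int → Int → Int
  | [], _, count => count
  | w :: rest, remaining, count =>
    if w ≤ remaining then maxApplesWhileA rest (remaining - w) (count + 1) else count

def maxNumberOfApples (weight : List Int) : Int :=
  if weight.sum < 5000 then (weight.length : Int)
  else maxApplesWhileA (PySem.List.sorted weight (fun x => x) false) 5000 0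

-- ===== PORT B =====
-- for w in sorted(weight): running += w; prefixes.append(running)
def applePrefixes : List Int → Int → List Int
  | [], _ => []
  | w :: rest, running => (running + w) :: applePrefixes rest (running + w)

-- return sum(1 for p in prefixes if p <= 5000)
def maxNumberOfApples_alt (weight : List Int) : Int :=
  if weight.sum < 5000 then (weight.length : Int)
  else ((applePrefixes (PySem.List.sorted weight (fun x => x) false) 0).countP
          (fun p => decide (p ≤ 5000)) : Int)

-- ===== PRECONDITION & SPEC =====
def Spec_maxNumberOfApples (weight : List Int) (out : Int) : Prop := out = maxNumberOfApples_alt weight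
instance (weight : List Int) (out : Int) : Decidable (Spec_maxNumberOfApples weight out) := by unfold Spec_maxNumberOfApples; infer_instance

-- ===== CLAIM (what is proved, stated in full; the proofs are below) =====
def Claim_equal_maxNumberOfApples : Prop := ∀ (weight : List Int), Dom_maxNumberOfApples weight → Spec_maxNumberOfApples weight (maxNumberOfApples weight)

-- ===== LEMMAS AND PROOFS =====

-- Once the running total has overshot 5000 and every remaining element is at least b > 0,
-- no later prefix sum comes back under 5000.
lemma applePrefixes_none_le (ws : List Int) : ∀ (t b : Int), 0 < b → 5000 < t →
    (∀ w ∈ ws, b ≤ w) → (applePrefixes ws t).countP (fun p => decide (p ≤ 5000)) = 0 := by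
  induction ws with
  | nil => intro t b _ _ _; simp [applePrefixes]
  | cons w rest ih =>
    intro t b hb ht hall
    have hw : b ≤ w := hall w (by simp)
    have hgt : ¬ (t + w ≤ 5000) := by omega
    simp only [applePrefixes, List.countP_cons, hgt, decide_false]
    exact ih (t + w) b hb (by omega) (fun x hx => hall x (by simp [hx]))

-- Loop invariant: A's countdown loop on a ≤-sorted list with budget 5000 - total and
-- count already taken equals count plus the number of prefix sums (from total) within 5000.
lemma maxApplesLoop_eq (ws : List Int) : ws.Pairwise (· ≤ ·) →
    ∀ (total count : Int), total ≤ 5000 →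
    maxApplesWhileA ws (5000 - total) count
      = count + ((applePrefixes ws total).countP (fun p => decide (p ≤ 5000)) : Int) := by
  induction ws with
  | nil => intro _ total count _; simp [maxApplesWhileA, applePrefixes]
  | cons w rest ih =>
    intro hp total count htot
    have hrest : rest.Pairwise (· ≤ ·) := hp.of_cons
    have hall : ∀ x ∈ rest, w ≤ x := fun x hx => List.rel_of_pairwise_cons hp hx
    simp only [maxApplesWhileA, applePrefixes, List.countP_cons]
    by_cases h : w ≤ 5000 - total
    · have hle : (total + w ≤ 5000) := by omega
      have heq : 5000 - total - w = 5000 - (total + w) := by ring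
      simp only [if_pos h, heq, ih hrest (total + w) (count + 1) hle, hle, decide_true, if_true]
      push_cast
      ring
    · -- w > remaining: A stops; the first prefix overshoots and (w > 0) every later one too
      have hgt : ¬ (total + w ≤ 5000) := by omega
      have hwpos : 0 < w := by omega
      have hzero := applePrefixes_none_le rest (total + w) w hwpos (by omega) hall
      simp [h, hgt, hzero]

-- ===== VERDICT (by name: the statement is the Claim_ definition above) =====
theorem maxNumberOfApples_spec : Claim_equal_maxNumberOfApples := by
  intro weight _
  unfold Spec_maxNumberOfApples maxNumberOfApples maxNumberOfApples_alt
  by_cases h : weight.sum < 5000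
  · simp [h]
  · simp only [if_neg h]
    have hp : (PySem.List.sorted weight (fun x => x) false).Pairwise (· ≤ ·) := by
      simpa using PySem.List.sorted_pairwise (xs := weight) (key := fun x => x)
    simpa using maxApplesLoop_eq _ hp 0 0 (by norm_num)
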